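-- pv_equiv track=rewrite | github.com/mrowan137/puzzles | misc/uniform_integers.py | generateUniformIntegers
-- ===== SOURCE A (Python) =====
-- def generateUniformIntegers(dA, dB):
--     uniformIntegers = []
--     for i in range(dA, dB + 1):
--         uniformInteger = sum([10 ** n for n in range(i)])
--         for j in range(1, 10):
--             uniformIntegers.append(uniformInteger)
--             uniformInteger += sum([10 ** n for n in range(i)])
--
--     return uniformIntegers
-- ===== SOURCE B (Python) =====
-- def generateUniformIntegers(dA, dB):
--     # closed-form repunit: 11...1 (i ones) = (10**i - 1)//9; empty (i <= 0) is 0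
--     def repunit(i):
--         return (10 ** i - 1) // 9 if i > 0 else 0
--     return [d * repunit(i) for i in range(dA, dB + 1) for d in range(1, 10)]
-- ===== Notes on version B (the rewrite author's own statement) =====
-- stated objective: simpler
-- what changed: B replaces A's per-length incremental accumulation (rebuilding the repunit sum([10**n for n in range(i)]) ten times per length and adding it step by step) with the closed-form repunit (10**i - 1)//9 and a single flat comprehension over lengths and digits.
import Mathlib
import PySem

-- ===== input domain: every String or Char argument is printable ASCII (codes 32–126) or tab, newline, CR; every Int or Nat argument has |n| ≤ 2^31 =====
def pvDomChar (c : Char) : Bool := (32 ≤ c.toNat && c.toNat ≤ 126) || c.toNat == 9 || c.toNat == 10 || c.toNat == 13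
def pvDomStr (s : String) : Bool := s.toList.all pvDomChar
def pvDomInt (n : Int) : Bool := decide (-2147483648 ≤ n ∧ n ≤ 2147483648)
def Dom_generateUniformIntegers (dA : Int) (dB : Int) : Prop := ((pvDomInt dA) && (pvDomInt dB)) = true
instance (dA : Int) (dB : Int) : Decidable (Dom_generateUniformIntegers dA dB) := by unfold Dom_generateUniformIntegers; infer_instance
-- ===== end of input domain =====

-- B replaces A's incremental repunit summation (rebuilt by a list-comprehension sum
-- ten times per length) with the closed form (10^i - 1)//9, for simplicity.

-- ===== PORT A =====
-- sum([10 ** n for n in range(i)]); n ranges over nonneg ints, so n.toNat is exact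
def pvSumPow (i : Int) : Int :=
  (((PySem.List.pyRange 0 i 1).map (fun n => (10 : Int) ^ n.toNat)).sum)

def generateUniformIntegers (dA : Int) (dB : Int) : List Int :=
  ((PySem.List.pyRange dA (dB + 1) 1).foldl
    (fun (uniformIntegers : List Int) (i : Int) =>
      let uniformInteger := pvSumPow i
      ((PySem.List.pyRange 1 10 1).foldl
        (fun (p : List Int × Int) (_j : Int) =>
          (p.1 ++ [p.2], p.2 + pvSumPow i))
        (uniformIntegers, uniformInteger)).1)
    [])

-- ===== PORT B =====
-- (10 ** i - 1) // 9 if i > 0 else 0 ; i > 0 so i.toNat is exact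
def pvRepunit (i : Int) : Int :=
  if i > 0 then PySem.Int.floordiv ((10 : Int) ^ i.toNat - 1) 9 else 0

def generateUniformIntegers_alt (dA : Int) (dB : Int) : List Int :=
  (PySem.List.pyRange dA (dB + 1) 1).flatMap
    (fun i => (PySem.List.pyRange 1 10 1).map (fun d => d * pvRepunit i))

-- ===== PRECONDITION & SPEC =====
def Spec_generateUniformIntegers (dA : Int) (dB : Int) (out : List Int) : Prop := out = generateUniformIntegers_alt dA dB
instance (dA : Int) (dB : Int) (out : List Int) : Decidable (Spec_generateUniformIntegers dA dB out) := by unfold Spec_generateUniformIntegers; infer_instance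

-- ===== CLAIM (what is proved, stated in full; the proofs are below) =====
def Claim_equal_generateUniformIntegers : Prop := ∀ (dA : Int) (dB : Int), Dom_generateUniformIntegers dA dB → Spec_generateUniformIntegers dA dB (generateUniformIntegers dA dB)

-- ===== LEMMAS AND PROOFS =====

-- geometric series: 9 * Σ_{k<m} 10^k = 10^m - 1
theorem pv_nine_mul_geom (m : Nat) :
    9 * ((List.range m).map (fun k => (10 : Int) ^ k)).sum = 10 ^ m - 1 := by
  induction m with
  | zero => simp
  | succ n ih => rw [List.range_succ]; simp [pow_succ]; ring_nf; ring_nf at ih; omega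

-- the closed-form repunit equals A's summed repunit
theorem pv_sumPow_eq_repunit (i : Int) : pvSumPow i = pvRepunit i := by
  unfold pvSumPow pvRepunit
  by_cases h : i > 0
  · rw [PySem.List.pyRange_one, if_pos h, List.map_map]
    have he : ((fun n : Int => (10 : Int) ^ n.toNat) ∘ fun k : Nat => (0 : Int) + (k : Int))
        = fun k : Nat => (10 : Int) ^ k := by
      funext k; simp
    rw [he]
    have hg := pv_nine_mul_geom (i - 0).toNat
    rw [PySem.Int.floordiv_eq_ediv_of_pos (by norm_num : (0 : Int) < 9)]
    have hi : i.toNat = (i - 0).toNat := by omega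
    rw [hi]
    omega
  · rw [if_neg h, PySem.List.pyRange_one_eq_nil (by omega)]
    simp

-- A's inner 9-step loop appends exactly the nine multiples of the repunit
theorem pv_hrange : PySem.List.pyRange 1 10 1 = [1, 2, 3, 4, 5, 6, 7, 8, 9] := by
  rw [PySem.List.pyRange_one]; rfl

theorem pv_inner_loop (acc : List Int) (r : Int) :
    ((PySem.List.pyRange 1 10 1).foldl
      (fun (p : List Int × Int) (_j : Int) => (p.1 ++ [p.2], p.2 + r)) (acc, r)).1
    = acc ++ [1 * r, 2 * r, 3 * r, 4 * r, 5 * r, 6 * r, 7 * r, 8 * r, 9 * r] := by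
  rw [pv_hrange]
  simp only [List.foldl, List.append_assoc, List.cons_append,
    List.nil_append]
  refine congrArg (acc ++ ·) ?_
  simp only [List.cons.injEq, and_true]
  refine ⟨by ring, by ring, by ring, by ring, by ring, by ring, by ring, by ring, by ring⟩

-- a fold that only appends is a flatMap
theorem pv_foldl_flatMap (F : List Int → Int → List Int) (g : Int → List Int)
    (h : ∀ acc i, F acc i = acc ++ g i) :
    ∀ (l : List Int) (acc : List Int), l.foldl F acc = acc ++ l.flatMap g := by
  intro l
  induction l with
  | nil => simp
  | cons x xs ih => intro acc; simp [List.foldl, h, ih]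

-- ===== VERDICT (by name: the statement is the Claim_ definition above) =====
theorem generateUniformIntegers_spec : Claim_equal_generateUniformIntegers := by
  intro dA dB _
  unfold Spec_generateUniformIntegers generateUniformIntegers generateUniformIntegers_alt
  rw [pv_foldl_flatMap _ (fun i => (PySem.List.pyRange 1 10 1).map (fun d => d * pvRepunit i))]
  · simp
  · intro acc i
    rw [pv_inner_loop acc (pvSumPow i), pv_sumPow_eq_repunit]
    rw [pv_hrange]
    simp
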